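-- pv_equiv track=rewrite | github.com/bamnamu/wargame | ctf/Gon_2024_spring_qual/misc/phony_for-user/solved.py | bitnot
-- ===== SOURCE A (Python) =====
-- def bitnot(c):
--     c=bin(int(c, 16))[2:]
--     d=""
--     for t in range(len(c)):
--         if(c[t]=='0'):
--             d=d+'1'
--         else:
--             d=d+'0'
--     d='0b'+d
--     c=hex(int(d, 2))[2:]
--     return c
-- ===== SOURCE B (Python) =====
-- def bitnot(c):
--     a = abs(int(c, 16))
--     if a == 0:
--         return '1'
--     digits = format(a, 'x')
--     lead = int(digits[0], 16)
--     flipped = [(1 << lead.bit_length()) - 1 - lead] + [15 - int(d, 16) for d in digits[1:]]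
--     out = ''.join('0123456789abcdef'[x] for x in flipped)
--     return out.lstrip('0') or '0'
-- ===== Notes on version B (the rewrite author's own statement) =====
-- stated objective: faster
-- what changed: Instead of A's binary round-trip (build bin(a), flip characters one by one with string concatenation, reparse base 2, reprint as hex), B complements the hex digits directly in one pass: each non-leading nibble becomes 15-d, the leading nibble is complemented within its own bit-length, then leading zeros are stripped.
import Mathlib
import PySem

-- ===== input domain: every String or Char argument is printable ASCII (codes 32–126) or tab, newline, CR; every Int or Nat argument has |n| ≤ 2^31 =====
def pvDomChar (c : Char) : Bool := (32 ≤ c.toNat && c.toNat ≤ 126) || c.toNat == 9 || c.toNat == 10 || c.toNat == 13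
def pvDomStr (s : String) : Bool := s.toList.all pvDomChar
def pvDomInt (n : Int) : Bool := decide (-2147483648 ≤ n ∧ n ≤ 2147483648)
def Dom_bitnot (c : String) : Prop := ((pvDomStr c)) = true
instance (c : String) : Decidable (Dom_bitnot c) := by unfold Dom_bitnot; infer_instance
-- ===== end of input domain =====

-- B flips the hex digits directly (nibble-wise complement, leading nibble within its own bit-length) instead of A's bin/flip-loop/reparse round-trip.


-- ===== PORT A =====
-- shared builtin helper: Python int(·,16) (both Source A and Source B call it)

def pyIsWS (c : Char) : Bool := c = ' ' || c = '\t' || c = '\n' || c = '\r' || c.toNat == 11 || c.toNat == 12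

def hexDigVal? (c : Char) : Option Nat :=
  if 48 ≤ c.toNat ∧ c.toNat ≤ 57 then some (c.toNat - 48)
  else if 97 ≤ c.toNat ∧ c.toNat ≤ 102 then some (c.toNat - 87)
  else if 65 ≤ c.toNat ∧ c.toNat ≤ 70 then some (c.toNat - 55)
  else none

-- digit run with single underscores allowed only between digits (CPython int-literal rule)
def hexDigitsGo (acc : Nat) : List Char → Option Nat
  | [] => some acc
  | '_' :: c :: rest =>
    match hexDigVal? c with
    | some v => hexDigitsGo (16 * acc + v) rest
    | none => none
  | c :: rest =>
    match hexDigVal? c with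
    | some v => hexDigitsGo (16 * acc + v) rest
    | none => none

def hexDigitsStart : List Char → Option Nat
  | [] => none
  | c :: rest =>
    match hexDigVal? c with
    | some v => hexDigitsGo v rest
    | none => none

-- Python int(s, 16): strip whitespace, optional sign, optional 0x/0X prefix
-- (one underscore allowed right after the prefix), hex digits with single
-- underscores between digits.  none = ValueError.  Exact on the Dom alphabet.
def hexParse? (s : List Char) : Option Int :=
  let l := ((s.dropWhile pyIsWS).reverse.dropWhile pyIsWS).reverse
  let (neg, l) : Bool × List Char :=
    match l with
    | '+' :: rest => (false, rest)
    | '-' :: rest => (true, rest)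
    | l => (false, l)
  let l : List Char :=
    match l with
    | '0' :: 'x' :: rest => (match rest with | '_' :: r => r | r => r)
    | '0' :: 'X' :: rest => (match rest with | '_' :: r => r | r => r)
    | l => l
  match hexDigitsStart l with
  | some v => some (if neg then -(v : Int) else (v : Int))
  | none => none

-- bin(n) digit loop (most significant first); bin' n [] are the digits of n (n>0)
def bin' (n : Nat) (acc : List Char) : List Char :=
  if h : n = 0 then acc
  else bin' (n / 2) (Nat.digitChar (n % 2) :: acc)
  termination_by n
  decreasing_by exact Nat.div_lt_self (Nat.pos_of_ne_zero h) (by norm_num)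

def binFull (m : Nat) : List Char := if m = 0 then ['0'] else bin' m []

-- int(d, 2) for the internal strings '0b' + bits built by A (exact on that shape)
def val2 (a : Nat) (l : List Char) : Nat :=
  l.foldl (fun a c => 2 * a + (if c = '1' then 1 else 0)) a

def intOfBin : List Char → Nat
  | '0' :: 'b' :: rest => val2 0 rest
  | l => val2 0 l

def hex' (n : Nat) (acc : List Char) : List Char :=
  if h : n = 0 then acc
  else hex' (n / 16) (Nat.digitChar (n % 16) :: acc)
  termination_by n
  decreasing_by exact Nat.div_lt_self (Nat.pos_of_ne_zero h) (by norm_num)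

def hexFull (m : Nat) : List Char := if m = 0 then ['0'] else hex' m []

-- literal port of A: parse, take bin(n)[2:] (keeps a stray 'b' for negative n),
-- flip '0'↔non-'0' char by char, prepend '0b', reparse base 2, print hex[2:].
def bitnot (c : String) : String :=
  match hexParse? c.toList with
  | none => ""  -- int(c,16) raises ValueError here; excluded by Pre_bitnot
  | some n =>
    let cbits : List Char := if n < 0 then 'b' :: binFull n.natAbs else binFull n.toNat
    let d : List Char := cbits.foldl (fun d t => d ++ [if t = '0' then '1' else '0']) []
    String.ofList (hexFull (intOfBin ('0' :: 'b' :: d)))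

-- ===== PORT B =====
-- a.bit_length()
def bitLen : Nat → Nat
  | 0 => 0
  | n + 1 => bitLen ((n + 1) / 2) + 1
  termination_by n => n
  decreasing_by omega

-- format(a, 'x') as a digit list, most significant first (a > 0 ⇒ nonempty, no leading 0)
def hexDigs (n : Nat) (acc : List Nat) : List Nat :=
  if h : n = 0 then acc
  else hexDigs (n / 16) (n % 16 :: acc)
  termination_by n
  decreasing_by exact Nat.div_lt_self (Nat.pos_of_ne_zero h) (by norm_num)

-- port of Source B: complement each hex digit (the leading one within its own
-- bit-length, the others against 15), then strip leading zeros, '0' if empty.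
def bitnot_alt (c : String) : String :=
  match hexParse? c.toList with
  | none => ""  -- int(c,16) raises ValueError here; excluded by Pre_bitnot
  | some n =>
    let a := n.natAbs
    if a = 0 then "1"
    else
      match hexDigs a [] with
      | [] => ""  -- unreachable: format(a,'x') is nonempty for a > 0
      | d0 :: rest =>
        let flipped : List Nat := ((1 <<< bitLen d0) - 1 - d0) :: rest.map (fun d => 15 - d)
        match (flipped.map Nat.digitChar).dropWhile (· = '0') with
        | [] => "0"
        | l => String.ofList l

-- ===== PRECONDITION & SPEC =====
-- shape helpers for Pre_ (strip / drop sign / drop 0x prefix, as int(·,16) does)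
def stripWS (s : List Char) : List Char := ((s.dropWhile pyIsWS).reverse.dropWhile pyIsWS).reverse

def dropSign : List Char → List Char
  | '+' :: r => r
  | '-' :: r => r
  | l => l

def dropHexPrefix : List Char → List Char
  | '0' :: 'x' :: rest => (match rest with | '_' :: r => r | r => r)
  | '0' :: 'X' :: rest => (match rest with | '_' :: r => r | r => r)
  | l => l

def isHexDig (c : Char) : Bool := (hexDigVal? c).isSome

-- Pre_: exactly the strings int(c,16) parses (elsewhere A raises ValueError):
-- after stripping whitespace, an optional sign and an optional 0x/0X prefix,
-- a nonempty run of hex digits with single underscores only between digits.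
def Pre_bitnot (c : String) : Prop :=
  let l := dropHexPrefix (dropSign (stripWS c.toList))
  l ≠ [] ∧ l.all (fun ch => isHexDig ch || ch == '_') = true ∧
  l.head? ≠ some '_' ∧ l.getLast? ≠ some '_' ∧
  (l.zip l.tail).all (fun p => !(p.1 == '_' && p.2 == '_')) = true
instance (c : String) : Decidable (Pre_bitnot c) := by unfold Pre_bitnot; infer_instance

def pvWitness_bitnot : String := "1a"

def Spec_bitnot (c : String) (out : String) : Prop := out = bitnot_alt c
instance (c : String) (out : String) : Decidable (Spec_bitnot c out) := by unfold Spec_bitnot; infer_instance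

-- ===== CLAIM (what is proved, stated in full; the proofs are below) =====
def Claim_equal_bitnot : Prop := ∀ (c : String), Dom_bitnot c → Pre_bitnot c → Spec_bitnot c (bitnot c)

-- ===== LEMMAS AND PROOFS =====

def flipc (c : Char) : Char := if c = '0' then '1' else '0'

lemma foldl_flip (s : List Char) : ∀ acc : List Char,
    s.foldl (fun d t => d ++ [if t = '0' then '1' else '0']) acc = acc ++ s.map flipc := by
  induction s with
  | nil => simp
  | cons c t ih => intro acc; simp [List.foldl, ih, flipc]

lemma val2_append (l : List Char) (a : Nat) (d : Char) :
    val2 a (l ++ [d]) = 2 * val2 a l + (if d = '1' then 1 else 0) := by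
  simp [val2]

lemma bin'_append (n : Nat) : ∀ acc, bin' n acc = bin' n [] ++ acc := by
  induction n using Nat.strong_induction_on with
  | _ n ih =>
    intro acc
    by_cases h : n = 0
    · simp [bin', h]
    · conv_lhs => rw [bin']
      conv_rhs => rw [bin']
      simp only [h, dite_false]
      have hlt : n / 2 < n := Nat.div_lt_self (Nat.pos_of_ne_zero h) (by norm_num)
      rw [ih _ hlt, ih _ hlt (Nat.digitChar (n % 2) :: [])]
      simp

lemma bitLen_pos (n : Nat) (h : 0 < n) : 0 < bitLen n := by
  cases n with
  | zero => omega
  | succ m => rw [bitLen]; omega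

-- the three bin' invariants in one strong induction
lemma bin'_invar (n : Nat) :
    (∀ a, val2 a (bin' n []) = a * 2 ^ bitLen n + n) ∧
    (bin' n []).length = bitLen n ∧
    (∀ c ∈ bin' n [], c = '0' ∨ c = '1') := by
  induction n using Nat.strong_induction_on with
  | _ n ih =>
    by_cases h : n = 0
    · subst h; refine ⟨?_, ?_, ?_⟩ <;> simp [bin', val2, bitLen]
    · have hlt : n / 2 < n := Nat.div_lt_self (Nat.pos_of_ne_zero h) (by norm_num)
      obtain ⟨ihv, ihl, ihb⟩ := ih _ hlt
      have hstep : bin' n [] = bin' (n / 2) [] ++ [Nat.digitChar (n % 2)] := by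
        rw [bin']; simp only [h, dite_false]; exact bin'_append _ _
      have hbl : bitLen n = bitLen (n / 2) + 1 := by
        cases n with
        | zero => omega
        | succ m => rw [bitLen]
      have hmod : n % 2 = 0 ∨ n % 2 = 1 := by omega
      have hdig : (Nat.digitChar (n % 2) = '1' ∧ n % 2 = 1) ∨
                  (Nat.digitChar (n % 2) = '0' ∧ n % 2 = 0) := by
        rcases hmod with h0 | h1
        · right; rw [h0]; exact ⟨by decide, rfl⟩
        · left; rw [h1]; exact ⟨by decide, rfl⟩
      refine ⟨?_, ?_, ?_⟩
      · intro a
        rw [hstep, val2_append, ihv, hbl]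
        rcases hdig with ⟨hd, hm⟩ | ⟨hd, hm⟩ <;> rw [hd] <;> simp <;> ring_nf <;> omega
      · rw [hstep]; simp [ihl, hbl]
      · rw [hstep]; intro c hc
        rcases List.mem_append.mp hc with hc | hc
        · exact ihb c hc
        · rcases hdig with ⟨hd, _⟩ | ⟨hd, _⟩ <;> simp at hc <;> rw [hc, hd] <;> tauto

-- flipping a 0/1 string complements its value within its bit-width
lemma val2_flip_sum (s : List Char) (hb : ∀ c ∈ s, c = '0' ∨ c = '1') :
    ∀ a b : Nat, val2 a (s.map flipc) + val2 b s + 1 = (a + b + 1) * 2 ^ s.length := by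
  induction s with
  | nil => intro a b; simp [val2]
  | cons c t ih =>
    intro a b
    have hc := hb c (by simp)
    have ht : ∀ c ∈ t, c = '0' ∨ c = '1' := fun c hc => hb c (by simp [hc])
    have key := ih ht
    rcases hc with h0 | h1
    · subst h0
      have : flipc '0' = '1' := by decide
      simp only [List.map, this, val2, List.foldl] at *
      have := key (2 * a + 1) (2 * b)
      simpa [val2, pow_succ] using by
        calc (List.foldl (fun a c => 2 * a + (if c = '1' then 1 else 0)) (2*a+1) (t.map flipc))
              + (List.foldl (fun a c => 2 * a + (if c = '1' then 1 else 0)) (2*b+0) t) + 1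
            = (2*a+1 + (2*b) + 1) * 2 ^ t.length := by simpa [val2] using this
          _ = (a + b + 1) * (2 ^ t.length * 2) := by ring
    · subst h1
      have : flipc '1' = '0' := by decide
      simp only [List.map, this, val2, List.foldl] at *
      have := key (2 * a) (2 * b + 1)
      simpa [val2, pow_succ] using by
        calc (List.foldl (fun a c => 2 * a + (if c = '1' then 1 else 0)) (2*a+0) (t.map flipc))
              + (List.foldl (fun a c => 2 * a + (if c = '1' then 1 else 0)) (2*b+1) t) + 1
            = (2*a + (2*b+1) + 1) * 2 ^ t.length := by simpa [val2] using this
          _ = (a + b + 1) * (2 ^ t.length * 2) := by ring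

-- the core identity for A's side: flip-and-reparse equals the bit complement
lemma core (a : Nat) :
    val2 0 ((binFull a).map flipc) =
      (1 <<< (if bitLen a = 0 then 1 else bitLen a)) - 1 - a := by
  by_cases h : a = 0
  · subst h
    have h1 : binFull 0 = ['0'] := by simp [binFull]
    have h2 : bitLen 0 = 0 := by rw [bitLen]
    rw [h1, h2]
    simp [val2, flipc, Nat.shiftLeft_eq]
  · obtain ⟨hv, hl, hb⟩ := bin'_invar a
    have hbl := bitLen_pos a (Nat.pos_of_ne_zero h)
    have hfull : binFull a = bin' a [] := by simp [binFull, h]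
    have hsum := val2_flip_sum (bin' a []) hb 0 0
    have hval : val2 0 (bin' a []) = a := by simpa using hv 0
    rw [hval, hl] at hsum
    norm_num at hsum
    have hL : (if bitLen a = 0 then 1 else bitLen a) = bitLen a := if_neg (by omega)
    rw [hfull, hL, Nat.shiftLeft_eq, one_mul]
    omega

lemma val2_cons0 (l : List Char) : val2 0 ('0' :: l) = val2 0 l := by
  simp [val2, List.foldl]

-- A's output reduced to the closed form
lemma bitnot_closed (c : String) (n : Int) (hp : hexParse? c.toList = some n) :
    bitnot c = String.ofList (hexFull
      ((1 <<< (if bitLen n.natAbs = 0 then 1 else bitLen n.natAbs)) - 1 - n.natAbs)) := by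
  unfold bitnot
  rw [hp]
  by_cases hneg : n < 0
  · simp only [hneg, if_true]
    rw [foldl_flip]
    have hflipb : flipc 'b' = '0' := by decide
    simp only [List.map, hflipb, List.nil_append, intOfBin]
    rw [val2_cons0, core]
  · simp only [hneg, if_false]
    rw [foldl_flip]
    simp only [List.nil_append, intOfBin]
    have : n.toNat = n.natAbs := by omega
    rw [this, core]

-- ---- B-side lemmas: hex digits, nibble-wise complement ----

def valH (a : Nat) (l : List Nat) : Nat := l.foldl (fun a d => 16 * a + d) a

lemma valH_cons (a d : Nat) (l : List Nat) : valH a (d :: l) = valH (16 * a + d) l := rfl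

lemma hexDigs_append (n : Nat) : ∀ acc, hexDigs n acc = hexDigs n [] ++ acc := by
  induction n using Nat.strong_induction_on with
  | _ n ih =>
    intro acc
    by_cases h : n = 0
    · simp [hexDigs, h]
    · conv_lhs => rw [hexDigs]
      conv_rhs => rw [hexDigs]
      simp only [h, dite_false]
      have hlt : n / 16 < n := Nat.div_lt_self (Nat.pos_of_ne_zero h) (by norm_num)
      rw [ih _ hlt, ih _ hlt (n % 16 :: [])]
      simp

lemma valH_append (l : List Nat) (a d : Nat) : valH a (l ++ [d]) = 16 * valH a l + d := by
  simp [valH]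

lemma hexDigs_invar (n : Nat) :
    (∀ a, valH a (hexDigs n []) = a * 16 ^ (hexDigs n []).length + n) ∧
    (∀ d ∈ hexDigs n [], d < 16) ∧
    (n ≠ 0 → ∃ d0 rest, hexDigs n [] = d0 :: rest ∧ d0 ≠ 0) := by
  induction n using Nat.strong_induction_on with
  | _ n ih =>
    by_cases h : n = 0
    · subst h; refine ⟨?_, ?_, ?_⟩ <;> simp [hexDigs, valH]
    · have hlt : n / 16 < n := Nat.div_lt_self (Nat.pos_of_ne_zero h) (by norm_num)
      obtain ⟨ihv, ihd, ihh⟩ := ih _ hlt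
      have hstep : hexDigs n [] = hexDigs (n / 16) [] ++ [n % 16] := by
        rw [hexDigs]; simp only [h, dite_false]; exact hexDigs_append _ _
      refine ⟨?_, ?_, ?_⟩
      · intro a
        rw [hstep, valH_append, ihv]
        simp [List.length_append, pow_succ]
        ring_nf
        omega
      · intro d hd
        rw [hstep] at hd
        rcases List.mem_append.mp hd with hd | hd
        · exact ihd d hd
        · simp at hd; omega
      · intro _
        by_cases h16 : n / 16 = 0
        · refine ⟨n % 16, [], ?_, ?_⟩
          · rw [hstep, h16]; simp [hexDigs]
          · omega
        · obtain ⟨d0, rest, heq, hd0⟩ := ihh h16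
          exact ⟨d0, rest ++ [n % 16], by rw [hstep, heq]; simp, hd0⟩

lemma valH_flip_sum (ds : List Nat) (hb : ∀ d ∈ ds, d < 16) :
    ∀ a b : Nat, valH a (ds.map (fun d => 15 - d)) + valH b ds + 1 = (a + b + 1) * 16 ^ ds.length := by
  induction ds with
  | nil => intro a b; simp [valH]
  | cons d t ih =>
    intro a b
    have hd := hb d (by simp)
    have ht : ∀ d ∈ t, d < 16 := fun d hd => hb d (by simp [hd])
    have key := ih ht (16 * a + (15 - d)) (16 * b + d)
    simp only [List.map, valH_cons]
    rw [key]
    have : 16 * a + (15 - d) + (16 * b + d) + 1 = 16 * (a + b + 1) := by omega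
    rw [this]
    simp [pow_succ]
    ring

lemma valH_ge (ds : List Nat) : ∀ a, a * 16 ^ ds.length ≤ valH a ds := by
  induction ds with
  | nil => intro a; simp [valH]
  | cons d t ih =>
    intro a
    rw [valH_cons]
    calc a * 16 ^ (d :: t).length = (16 * a) * 16 ^ t.length := by simp [pow_succ]; ring
      _ ≤ (16 * a + d) * 16 ^ t.length := by
          exact Nat.mul_le_mul_right _ (by omega)
      _ ≤ valH (16 * a + d) t := ih _

lemma valH_lt (ds : List Nat) (hb : ∀ d ∈ ds, d < 16) : ∀ a, valH a ds < (a + 1) * 16 ^ ds.length := by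
  induction ds with
  | nil => intro a; simp [valH]
  | cons d t ih =>
    intro a
    have hd := hb d (by simp)
    have ht : ∀ d ∈ t, d < 16 := fun d hd => hb d (by simp [hd])
    rw [valH_cons]
    calc valH (16 * a + d) t < (16 * a + d + 1) * 16 ^ t.length := ih ht _
      _ ≤ (16 * (a + 1)) * 16 ^ t.length := Nat.mul_le_mul_right _ (by omega)
      _ = (a + 1) * 16 ^ (d :: t).length := by simp [pow_succ]; ring

lemma hex'_append (n : Nat) : ∀ acc, hex' n acc = hex' n [] ++ acc := by
  induction n using Nat.strong_induction_on with
  | _ n ih =>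
    intro acc
    by_cases h : n = 0
    · simp [hex', h]
    · conv_lhs => rw [hex']
      conv_rhs => rw [hex']
      simp only [h, dite_false]
      have hlt : n / 16 < n := Nat.div_lt_self (Nat.pos_of_ne_zero h) (by norm_num)
      rw [ih _ hlt, ih _ hlt (Nat.digitChar (n % 16) :: [])]
      simp

-- hex' prints back any leading-zero-free digit list
lemma hexRepr (ds : List Nat) (hb : ∀ d ∈ ds, d < 16) (hh : ds.head? ≠ some 0) (hne : ds ≠ []) :
    hex' (valH 0 ds) [] = ds.map Nat.digitChar := by
  induction ds using List.reverseRecOn with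
  | nil => exact absurd rfl hne
  | append_singleton init e ih =>
    have he : e < 16 := hb e (by simp)
    rcases init with _ | ⟨d, t⟩
    · -- single digit e, e ≠ 0
      have he0 : e ≠ 0 := by simpa using hh
      have hv : valH 0 ([] ++ [e]) = e := by simp [valH]
      rw [hv]
      rw [hex']
      simp only [he0, dite_false]
      rw [Nat.div_eq_of_lt he, Nat.mod_eq_of_lt he]
      simp [hex']
    · have hbi : ∀ x ∈ d :: t, x < 16 := fun x hx => hb x (by simp at hx ⊢; tauto)
      have hhi : (d :: t).head? ≠ some 0 := by simpa using hh
      have hd0 : d ≠ 0 := by simpa using hhi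
      have hih := ih hbi hhi (by simp)
      have hvpos : 0 < valH 0 (d :: t) := by
        have := valH_ge t d
        have hd1 : 1 ≤ d := Nat.pos_of_ne_zero hd0
        have h16 : 1 ≤ 16 ^ t.length := Nat.one_le_pow _ _ (by norm_num)
        calc 0 < d * 16 ^ t.length := by positivity
          _ ≤ valH d t := valH_ge t d
          _ = valH 0 (d :: t) := by simp [valH_cons]
      rw [valH_append]
      rw [hex']
      have hne2 : 16 * valH 0 (d :: t) + e ≠ 0 := by omega
      simp only [hne2, dite_false]
      have hdiv : (16 * valH 0 (d :: t) + e) / 16 = valH 0 (d :: t) := by omega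
      have hmod : (16 * valH 0 (d :: t) + e) % 16 = e := by omega
      rw [hdiv, hmod, hex'_append, hih]
      simp

lemma digitChar_eq_zero_iff (d : Nat) (h : d < 16) : Nat.digitChar d = '0' ↔ d = 0 := by
  interval_cases d <;> simp <;> decide

lemma dropWhile_map_digitChar (ds : List Nat) (hb : ∀ d ∈ ds, d < 16) :
    (ds.map Nat.digitChar).dropWhile (· = '0') = (ds.dropWhile (· = 0)).map Nat.digitChar := by
  induction ds with
  | nil => simp
  | cons d t ih =>
    have hd := hb d (by simp)
    have ht : ∀ x ∈ t, x < 16 := fun x hx => hb x (by simp [hx])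
    by_cases h0 : d = 0
    · subst h0
      have hz : Nat.digitChar 0 = '0' := by decide
      simp [List.dropWhile, hz, ih ht]
    · have : Nat.digitChar d ≠ '0' := fun hc => h0 ((digitChar_eq_zero_iff d hd).mp hc)
      simp [List.dropWhile, this, h0]

lemma valH_dropWhile (ds : List Nat) : valH 0 (ds.dropWhile (· = 0)) = valH 0 ds := by
  induction ds with
  | nil => rfl
  | cons d t ih =>
    by_cases h0 : d = 0
    · subst h0; simpa [List.dropWhile, valH_cons] using ih
    · simp [List.dropWhile, h0]

-- bitLen bounds and uniqueness
lemma bitLen_bounds (n : Nat) (h : 0 < n) : 2 ^ (bitLen n - 1) ≤ n ∧ n < 2 ^ bitLen n := by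
  induction n using Nat.strong_induction_on with
  | _ n ih =>
    match n, h with
    | 1, _ => constructor <;> simp [bitLen]
    | (m + 2), _ =>
      have hstep : bitLen (m + 2) = bitLen ((m + 2) / 2) + 1 := by rw [bitLen]
      have hpos : 0 < (m + 2) / 2 := by omega
      have hlt : (m + 2) / 2 < m + 2 := by omega
      obtain ⟨hlo, hhi⟩ := ih _ hlt hpos
      have hbp := bitLen_pos _ hpos
      constructor
      · have hsub : bitLen ((m + 2) / 2) - 1 + 1 = bitLen ((m + 2) / 2) := by omega
        have h2 : 2 ^ bitLen ((m + 2) / 2) = 2 ^ (bitLen ((m + 2) / 2) - 1) * 2 := by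
          conv_lhs => rw [← hsub]
          rw [pow_succ]
        rw [hstep, Nat.add_sub_cancel]
        omega
      · rw [hstep, pow_succ]; omega

lemma bitLen_unique (n t : Nat) (ht : 0 < t) (hlo : 2 ^ (t - 1) ≤ n) (hhi : n < 2 ^ t) :
    bitLen n = t := by
  have hn : 0 < n := by
    have h1 : 1 ≤ 2 ^ (t - 1) := Nat.one_le_two_pow
    omega
  obtain ⟨hlo', hhi'⟩ := bitLen_bounds n hn
  have hbp := bitLen_pos n hn
  by_contra hne
  rcases Nat.lt_or_ge (bitLen n) t with hc | hc
  · have : 2 ^ (bitLen n) ≤ 2 ^ (t - 1) := Nat.pow_le_pow_right (by norm_num) (by omega)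
    omega
  · have hc' : t < bitLen n := by omega
    have : 2 ^ t ≤ 2 ^ (bitLen n - 1) := Nat.pow_le_pow_right (by norm_num) (by omega)
    omega

-- bit length of a number from its leading hex digit
lemma bitLen_of_digits (d0 : Nat) (rest : List Nat) (hd0 : d0 ≠ 0) (_hd16 : d0 < 16)
    (hr : ∀ d ∈ rest, d < 16) :
    bitLen (valH d0 rest) = bitLen d0 + 4 * rest.length := by
  have hpos : 0 < d0 := Nat.pos_of_ne_zero hd0
  obtain ⟨hlo0, hhi0⟩ := bitLen_bounds d0 hpos
  have hbp := bitLen_pos d0 hpos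
  have h16k : (16 : Nat) ^ rest.length = 2 ^ (4 * rest.length) := by
    rw [show (16 : Nat) = 2 ^ 4 by norm_num, ← pow_mul]
  have hlow : 2 ^ (bitLen d0 + 4 * rest.length - 1) ≤ valH d0 rest := by
    have h1 : 2 ^ (bitLen d0 + 4 * rest.length - 1) = 2 ^ (bitLen d0 - 1) * 2 ^ (4 * rest.length) := by
      rw [← pow_add]
      congr 1
      omega
    have h2 : 2 ^ (bitLen d0 - 1) * 2 ^ (4 * rest.length) ≤ d0 * 16 ^ rest.length := by
      rw [h16k]
      exact Nat.mul_le_mul_right _ hlo0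
    have h3 := valH_ge rest d0
    omega
  have hhigh : valH d0 rest < 2 ^ (bitLen d0 + 4 * rest.length) := by
    have h1 := valH_lt rest hr d0
    have h2 : (d0 + 1) * 16 ^ rest.length ≤ 2 ^ bitLen d0 * 2 ^ (4 * rest.length) := by
      rw [h16k]
      exact Nat.mul_le_mul_right _ (by omega)
    have h3 : 2 ^ bitLen d0 * 2 ^ (4 * rest.length) = 2 ^ (bitLen d0 + 4 * rest.length) := by
      rw [← pow_add]
    omega
  exact bitLen_unique _ _ (by omega) hlow hhigh

lemma dropWhile_zero_head (ds : List Nat) (e : Nat) (t : List Nat)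
    (h : ds.dropWhile (· = 0) = e :: t) : e ≠ 0 := by
  induction ds with
  | nil => simp at h
  | cons d l ih =>
    by_cases h0 : d = 0
    · subst h0; rw [List.dropWhile_cons] at h; simpa using ih (by simpa using h)
    · rw [List.dropWhile_cons] at h
      simp only [decide_eq_true_eq, h0, if_false] at h
      cases h; exact h0

-- B's output equals the closed form hexFull (2^L - 1 - a)
lemma alt_closed (c : String) (n : Int) (hp : hexParse? c.toList = some n) :
    bitnot_alt c = String.ofList (hexFull
      ((1 <<< (if bitLen n.natAbs = 0 then 1 else bitLen n.natAbs)) - 1 - n.natAbs)) := by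
  unfold bitnot_alt
  rw [hp]
  simp only []
  set a := n.natAbs with ha
  by_cases h0 : a = 0
  · simp only [h0, if_true]
    have hb0 : (1 <<< (if bitLen 0 = 0 then 1 else bitLen 0)) - 1 - 0 = 1 := by
      have h2 : bitLen 0 = 0 := by rw [bitLen]
      rw [h2]; simp [Nat.shiftLeft_eq]
    rw [hb0]
    have h1 : hexFull 1 = ['1'] := by
      simp [hexFull]; rw [hex']; norm_num [Nat.digitChar]; rw [hex']; simp
    rw [h1]
  · simp only [h0, if_false]
    obtain ⟨hv, hd, hh⟩ := hexDigs_invar a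
    obtain ⟨d0, rest, heq, hd0⟩ := hh h0
    rw [heq]
    dsimp only
    have hd016 : d0 < 16 := hd d0 (heq ▸ by simp)
    have hr16 : ∀ d ∈ rest, d < 16 := fun d hdm => hd d (heq ▸ by simp [hdm])
    have hbp := bitLen_pos d0 (Nat.pos_of_ne_zero hd0)
    obtain ⟨hlo0, hhi0⟩ := bitLen_bounds d0 (Nat.pos_of_ne_zero hd0)
    -- a = valH d0 rest
    have hav : valH d0 rest = a := by
      have := hv 0
      rw [heq] at this
      simpa [valH_cons] using this
    -- the value of the flipped digit list
    set c0 := (1 <<< bitLen d0) - 1 - d0 with hc0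
    have hc0v : c0 = 2 ^ bitLen d0 - 1 - d0 := by rw [hc0, Nat.shiftLeft_eq, one_mul]
    have hc016 : c0 < 16 := by
      have hb4 : bitLen d0 ≤ 4 := by
        by_contra hgt
        have : 2 ^ 4 ≤ 2 ^ (bitLen d0 - 1) := Nat.pow_le_pow_right (by norm_num) (by omega)
        omega
      have : 2 ^ bitLen d0 ≤ 16 := by
        calc 2 ^ bitLen d0 ≤ 2 ^ 4 := Nat.pow_le_pow_right (by norm_num) hb4
          _ = 16 := by norm_num
      omega
    have hflipval : valH 0 (c0 :: rest.map (fun d => 15 - d)) =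
        2 ^ (bitLen a) - 1 - a := by
      have hsum := valH_flip_sum rest hr16 c0 d0
      have hL : bitLen a = bitLen d0 + 4 * rest.length := by
        rw [← hav]; exact bitLen_of_digits d0 rest hd0 hd016 hr16
      have h16k : (16 : Nat) ^ rest.length = 2 ^ (4 * rest.length) := by
        rw [show (16 : Nat) = 2 ^ 4 by norm_num, ← pow_mul]
      have hc0d0 : c0 + d0 + 1 = 2 ^ bitLen d0 := by
        have : d0 < 2 ^ bitLen d0 := hhi0
        omega
      have hval : valH c0 (rest.map (fun d => 15 - d)) + a + 1 = 2 ^ bitLen a := by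
        rw [hL, ← hav, hsum, hc0d0, h16k, ← pow_add]
      have : valH 0 (c0 :: rest.map (fun d => 15 - d)) = valH c0 (rest.map (fun d => 15 - d)) := by
        simp [valH_cons]
      omega
    have hLpos : bitLen a ≠ 0 := by
      have : 0 < bitLen a := bitLen_pos a (Nat.pos_of_ne_zero h0)
      omega
    rw [if_neg hLpos, Nat.shiftLeft_eq, one_mul]
    -- now relate the char-level output to hexFull
    have hall : ∀ d ∈ c0 :: rest.map (fun d => 15 - d), d < 16 := by
      intro d hdm
      rcases List.mem_cons.mp hdm with h | h
      · omega
      · obtain ⟨x, hx, hx'⟩ := List.mem_map.mp h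
        omega
    rw [dropWhile_map_digitChar _ hall]
    set ds := c0 :: rest.map (fun d => 15 - d) with hds
    have hvds : valH 0 (ds.dropWhile (· = 0)) = 2 ^ bitLen a - 1 - a := by
      rw [valH_dropWhile, hflipval]
    cases hcase : ds.dropWhile (· = 0) with
    | nil =>
      rw [hcase] at hvds
      have hm0 : 2 ^ bitLen a - 1 - a = 0 := by simpa [valH] using hvds.symm
      rw [hm0]
      simp only [List.map_nil]
      rfl
    | cons e t =>
      have he0 : e ≠ 0 := dropWhile_zero_head ds e t hcase
      have het : ∀ d ∈ e :: t, d < 16 := by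
        intro d hdm
        exact hall d ((List.dropWhile_sublist _).subset (hcase ▸ hdm))
      have hvpos : 0 < valH 0 (e :: t) := by
        have h1 : e * 16 ^ t.length ≤ valH e t := valH_ge t e
        have h2 : 1 ≤ 16 ^ t.length := Nat.one_le_pow _ _ (by norm_num)
        have h3 : valH 0 (e :: t) = valH e t := by simp [valH_cons]
        have h4 : 1 ≤ e := Nat.pos_of_ne_zero he0
        nlinarith
      have hm : 2 ^ bitLen a - 1 - a = valH 0 (e :: t) := by
        rw [hcase] at hvds; omega
      rw [hm]
      have hfull : hexFull (valH 0 (e :: t)) = hex' (valH 0 (e :: t)) [] := by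
        simp [hexFull]; omega
      rw [hfull, hexRepr (e :: t) het (by simpa using he0) (by simp)]
      simp only [List.map_cons]

-- ===== VERDICT (by name: the statement is the Claim_ definition above) =====
theorem bitnot_spec : Claim_equal_bitnot := by
  intro c _ hpre
  unfold Spec_bitnot
  cases hp : hexParse? c.toList with
  | none => unfold bitnot bitnot_alt; rw [hp]
  | some n => rw [bitnot_closed c n hp, alt_closed c n hp]
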